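-- pv_equiv track=rewrite | github.com/davidebolo1993/TRiCoLOR | TRiCoLOR/REFER/Helper/writer.py | Modifier
-- ===== SOURCE A (Python) =====
-- def modifier(coordinates): #fast way to remove None and substitute with closest number in list
--
--
-- 	coordinates=[el+1 if el is not None else el for el in coordinates] #get true coordinates
-- 	start=next(ele for ele in coordinates if ele is not None)
--
-- 	for ind, ele in enumerate(coordinates):
--
-- 		if ele is None:
--
-- 			coordinates[ind] = start
--
-- 		else:
--
-- 			start = ele
--
-- 	return coordinates
--
-- def Modifier(list_of_coord,seq,reps):
--
--
-- 	coords_without_insertions=modifier(list_of_coord)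
--
-- 	#Modify deletions
--
-- 	NewSeq=''
-- 	coords_purified=[]
--
-- 	for i in range(len(coords_without_insertions)-1):
--
-- 		if coords_without_insertions[i+1]-coords_without_insertions[i] > 1:
--
-- 			coords_purified.append(coords_without_insertions[i])
-- 			coords_purified.extend(list(range(coords_without_insertions[i]+1,coords_without_insertions[i+1])))
-- 			NewSeq+=seq[i]
-- 			NewSeq+="-"*(coords_without_insertions[i+1]-coords_without_insertions[i]-1)
--
-- 		else:
--
-- 			coords_purified.append(coords_without_insertions[i])
-- 			NewSeq+=seq[i]
--
-- 	coords_purified.append(coords_without_insertions[-1])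
-- 	NewSeq+=seq[-1]
--
--
-- 	if not reps[0] >= coords_purified[0]: #add fake positions that will be removed
--
--
-- 		number=reps[0]
-- 		how_many=coords_purified[0]-reps[0]
-- 		coords_purified = [number]*how_many + coords_purified
-- 		NewSeq= '-'* how_many + NewSeq
--
--
-- 	if not reps[1] <= coords_purified[-1]: #add fake positions that will be removed
--
-- 		number=reps[1]
-- 		how_many=reps[1] - coords_purified[-1]
-- 		coords_purified = coords_purified + [number]*how_many
-- 		NewSeq= NewSeq + '-'* how_many
--
--
-- 	return coords_purified,NewSeq
-- ===== SOURCE B (Python) =====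
-- def Modifier(list_of_coord, seq, reps):
--     # single pass: carry the last filled coordinate, emit pair gaps on the fly
--     prev = next(el for el in list_of_coord if el is not None) + 1
--     coords = []
--     pieces = []
--     for i, el in enumerate(list_of_coord):
--         cur = el + 1 if el is not None else prev
--         if i > 0:
--             coords.append(prev)
--             coords.extend(range(prev + 1, cur))
--             pieces.append(seq[i - 1])
--             pieces.append('-' * (cur - prev - 1))
--         prev = cur
--     coords.append(prev)
--     pieces.append(seq[-1])
--     head = max(0, coords[0] - reps[0])
--     tail = max(0, reps[1] - coords[-1])
--     return ([reps[0]] * head + coords + [reps[1]] * tail,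
--             '-' * head + ''.join(pieces) + '-' * tail)
-- ===== Notes on version B (the rewrite author's own statement) =====
-- stated objective: simpler
-- what changed: The separate forward-fill pass plus index-pair loop are merged into one traversal of list_of_coord that carries the last filled coordinate, emits gaps unconditionally (empty ranges/dash runs vanish), and replaces the two conditional padding blocks by max(0,...) arithmetic.
import Mathlib
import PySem

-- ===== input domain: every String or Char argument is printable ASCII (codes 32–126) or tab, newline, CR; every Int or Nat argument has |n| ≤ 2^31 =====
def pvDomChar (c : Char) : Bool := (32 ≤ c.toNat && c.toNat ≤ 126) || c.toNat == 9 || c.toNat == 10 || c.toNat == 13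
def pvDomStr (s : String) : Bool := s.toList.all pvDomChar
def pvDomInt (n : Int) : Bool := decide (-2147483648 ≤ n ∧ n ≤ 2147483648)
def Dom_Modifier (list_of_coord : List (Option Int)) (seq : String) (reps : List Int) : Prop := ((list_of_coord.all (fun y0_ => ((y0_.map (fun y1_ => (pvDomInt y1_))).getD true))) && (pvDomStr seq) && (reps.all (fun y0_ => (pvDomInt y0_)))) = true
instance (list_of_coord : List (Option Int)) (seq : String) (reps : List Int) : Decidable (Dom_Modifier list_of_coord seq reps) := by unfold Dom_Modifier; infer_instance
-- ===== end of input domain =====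

-- B merges A's forward-fill pass and index-pair loop into one traversal carrying the
-- last filled coordinate, and replaces the two conditional padding blocks by max(0,·)
-- arithmetic (objective: simpler). No argument is mutated by either version.

-- ===== PORT A =====
-- helper 'modifier': forward-fill of None with the running last value ('start')
def modifierFill : List (Option Int) → Int → List Int
  | [], _ => []
  | none :: rest, start => start :: modifierFill rest start
  | some e :: rest, _ => e :: modifierFill rest e

def Modifier (list_of_coord : List (Option Int)) (seq : String) (reps : List Int) : List Int × String :=
  let coordinates := list_of_coord.map (fun el => el.map (· + 1))
  match coordinates.findSome? id with
  | none => ([], "")  -- Python raises StopIteration here; excluded by Pre_Modifier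
  | some start =>
    let c := modifierFill coordinates start
    let s := seq.toList
    let res : List Int × List Char :=
      (PySem.List.pyRange 0 ((c.length : Int) - 1) 1).foldl
        (fun acc i =>
          if PySem.List.pyGetD c (i + 1) 0 - PySem.List.pyGetD c i 0 > 1 then
            (acc.1 ++ [PySem.List.pyGetD c i 0] ++
               PySem.List.pyRange (PySem.List.pyGetD c i 0 + 1) (PySem.List.pyGetD c (i + 1) 0) 1,
             acc.2 ++ [PySem.List.pyGetD s i ' '] ++
               List.replicate (PySem.List.pyGetD c (i + 1) 0 - PySem.List.pyGetD c i 0 - 1).toNat '-')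
          else
            (acc.1 ++ [PySem.List.pyGetD c i 0], acc.2 ++ [PySem.List.pyGetD s i ' ']))
        ([], [])
    let cp0 := res.1 ++ [PySem.List.pyGetD c (-1) 0]
    let ns0 := res.2 ++ [PySem.List.pyGetD s (-1) ' ']
    let r0 := PySem.List.pyGetD reps 0 0
    let r1 := PySem.List.pyGetD reps 1 0
    let p1 : List Int × List Char :=
      if ¬ (r0 ≥ PySem.List.pyGetD cp0 0 0) then
        (List.replicate (PySem.List.pyGetD cp0 0 0 - r0).toNat r0 ++ cp0,
         List.replicate (PySem.List.pyGetD cp0 0 0 - r0).toNat '-' ++ ns0)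
      else (cp0, ns0)
    let p2 : List Int × List Char :=
      if ¬ (r1 ≤ PySem.List.pyGetD p1.1 (-1) 0) then
        (p1.1 ++ List.replicate (r1 - PySem.List.pyGetD p1.1 (-1) 0).toNat r1,
         p1.2 ++ List.replicate (r1 - PySem.List.pyGetD p1.1 (-1) 0).toNat '-')
      else p1
    (p2.1, String.ofList p2.2)

-- ===== PORT B =====
-- one pass: prev = last filled coordinate; for i>0 emit (prev, gap, char seq[i-1])
def altLoop (s : List Char) : List (Option Int) → Nat → Int → List Int → List Char → List Int × List Char × Int
  | [], _, prev, coords, pieces => (coords, pieces, prev)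
  | el :: rest, i, prev, coords, pieces =>
    let cur := match el with | some e => e + 1 | none => prev
    if i > 0 then
      altLoop s rest (i + 1) cur
        (coords ++ [prev] ++ PySem.List.pyRange (prev + 1) cur 1)
        (pieces ++ [PySem.List.pyGetD s ((i : Int) - 1) ' '] ++ List.replicate (cur - prev - 1).toNat '-')
    else
      altLoop s rest (i + 1) cur coords pieces

def Modifier_alt (list_of_coord : List (Option Int)) (seq : String) (reps : List Int) : List Int × String :=
  match list_of_coord.findSome? id with
  | none => ([], "")  -- Python raises StopIteration here; excluded by Pre_Modifier
  | some f =>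
    let s := seq.toList
    let r := altLoop s list_of_coord 0 (f + 1) [] []
    let coords := r.1 ++ [r.2.2]
    let pieces := r.2.1 ++ [PySem.List.pyGetD s (-1) ' ']
    let r0 := PySem.List.pyGetD reps 0 0
    let r1 := PySem.List.pyGetD reps 1 0
    let head := max 0 (PySem.List.pyGetD coords 0 0 - r0)
    let tail := max 0 (r1 - PySem.List.pyGetD coords (-1) 0)
    (List.replicate head.toNat r0 ++ coords ++ List.replicate tail.toNat r1,
     String.ofList (List.replicate head.toNat '-' ++ pieces ++ List.replicate tail.toNat '-'))

-- ===== PRECONDITION & SPEC =====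
-- Pre_ excludes exactly the inputs where the Python A raises: StopIteration when every
-- element is None, IndexError when seq is too short for the used indices (seq[i] for
-- i < len-1 and seq[-1]) or when reps has fewer than two elements.
def Pre_Modifier (list_of_coord : List (Option Int)) (seq : String) (reps : List Int) : Prop :=
  list_of_coord.any (fun x => x.isSome) = true ∧
  list_of_coord.length ≤ seq.toList.length + 1 ∧
  1 ≤ seq.toList.length ∧
  2 ≤ reps.length
instance (list_of_coord : List (Option Int)) (seq : String) (reps : List Int) : Decidable (Pre_Modifier list_of_coord seq reps) := by unfold Pre_Modifier; infer_instance

def pvWitness_Modifier : List (Option Int) × String × List Int :=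
  ([some 2, none, some 6, none], "ACGT", [1, 10])

def Spec_Modifier (list_of_coord : List (Option Int)) (seq : String) (reps : List Int) (out : List Int × String) : Prop := out = Modifier_alt list_of_coord seq reps
instance (list_of_coord : List (Option Int)) (seq : String) (reps : List Int) (out : List Int × String) : Decidable (Spec_Modifier list_of_coord seq reps out) := by unfold Spec_Modifier; infer_instance

-- ===== CLAIM (what is proved, stated in full; the proofs are below) =====
def Claim_equal_Modifier : Prop := ∀ (list_of_coord : List (Option Int)) (seq : String) (reps : List Int), Dom_Modifier list_of_coord seq reps → Pre_Modifier list_of_coord seq reps → Spec_Modifier list_of_coord seq reps (Modifier list_of_coord seq reps)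

-- ===== LEMMAS AND PROOFS =====

-- the fill of list_of_coord after the +1 map, as one structural pass (proof vehicle)
def fillF : List (Option Int) → Int → List Int
  | [], _ => []
  | none :: rest, p => p :: fillF rest p
  | some e :: rest, _ => (e + 1) :: fillF rest (e + 1)

-- the common "body" both programs build: per adjacent pair, the left endpoint + gap
def pairsC : List Int → List Int
  | [] => []
  | [_] => []
  | a :: b :: r => a :: (PySem.List.pyRange (a + 1) b 1 ++ pairsC (b :: r))

def pairsS : List Int → List Char → List Char
  | a :: b :: r, ch :: t => ch :: (List.replicate (b - a - 1).toNat '-' ++ pairsS (b :: r) t)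
  | _, _ => []

theorem fillF_eq (lc : List (Option Int)) (p : Int) :
    modifierFill (lc.map (fun el => el.map (· + 1))) p = fillF lc p := by
  induction lc generalizing p with
  | nil => rfl
  | cons el rest ih => cases el <;> simp [modifierFill, fillF, ih]

theorem fillF_length (lc : List (Option Int)) (p : Int) : (fillF lc p).length = lc.length := by
  induction lc generalizing p with
  | nil => rfl
  | cons el rest ih => cases el <;> simp [fillF, ih]

theorem findSome?_map_add (lc : List (Option Int)) :
    (lc.map (fun el => el.map (· + 1))).findSome? id = (lc.findSome? id).map (· + 1) := by
  induction lc with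
  | nil => rfl
  | cons el rest ih => cases el <;> simp [List.findSome?, ih]

theorem findSome?_of_any (lc : List (Option Int)) (h : lc.any (fun x => x.isSome) = true) :
    ∃ f, lc.findSome? id = some f := by
  induction lc with
  | nil => simp at h
  | cons el rest ih =>
    cases el with
    | some e => exact ⟨e, by simp [List.findSome?]⟩
    | none => simp [List.findSome?] at h ⊢; exact ih (by simpa using h)


theorem pyRange_one_nil {a b : Int} (h : b ≤ a) : PySem.List.pyRange a b 1 = [] := by
  rw [PySem.List.pyRange_one]
  have : (b - a).toNat = 0 := by omega
  simp [this]

theorem foldA_flat (c : List Int) (s : List Char) (L : List Int) (ca : List Int) (pa : List Char) :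
    L.foldl
      (fun acc i =>
        if PySem.List.pyGetD c (i + 1) 0 - PySem.List.pyGetD c i 0 > 1 then
          (acc.1 ++ [PySem.List.pyGetD c i 0] ++
             PySem.List.pyRange (PySem.List.pyGetD c i 0 + 1) (PySem.List.pyGetD c (i + 1) 0) 1,
           acc.2 ++ [PySem.List.pyGetD s i ' '] ++
             List.replicate (PySem.List.pyGetD c (i + 1) 0 - PySem.List.pyGetD c i 0 - 1).toNat '-')
        else
          (acc.1 ++ [PySem.List.pyGetD c i 0], acc.2 ++ [PySem.List.pyGetD s i ' ']))
      (ca, pa)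
    = (ca ++ L.flatMap (fun i => PySem.List.pyGetD c i 0 :: PySem.List.pyRange (PySem.List.pyGetD c i 0 + 1) (PySem.List.pyGetD c (i + 1) 0) 1),
       pa ++ L.flatMap (fun i => PySem.List.pyGetD s i ' ' :: List.replicate (PySem.List.pyGetD c (i + 1) 0 - PySem.List.pyGetD c i 0 - 1).toNat '-')) := by
  induction L generalizing ca pa with
  | nil => simp
  | cons i L ih =>
    simp only [List.foldl_cons, List.flatMap_cons]
    by_cases h : PySem.List.pyGetD c (i + 1) 0 - PySem.List.pyGetD c i 0 > 1
    · rw [if_pos h, ih]; simp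
    · rw [if_neg h, ih]
      have h1 : PySem.List.pyRange (PySem.List.pyGetD c i 0 + 1) (PySem.List.pyGetD c (i + 1) 0) 1 = [] :=
        pyRange_one_nil (by omega)
      have h2 : (PySem.List.pyGetD c (i + 1) 0 - PySem.List.pyGetD c i 0 - 1).toNat = 0 := by omega
      simp [h1, h2]

theorem flatC_nat : ∀ (c : List Int),
    (List.range (c.length - 1)).flatMap
      (fun k : Nat => c.getD k 0 :: PySem.List.pyRange (c.getD k 0 + 1) (c.getD (k + 1) 0) 1)
    = pairsC c
  | [] => by simp [pairsC]
  | [a] => by simp [pairsC]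
  | a :: b :: r => by
    have h1 : (a :: b :: r).length - 1 = r.length + 1 := by simp
    have hsh : ∀ k : Nat,
        ((a :: b :: r).getD (k + 1) 0 ::
          PySem.List.pyRange ((a :: b :: r).getD (k + 1) 0 + 1) ((a :: b :: r).getD (k + 1 + 1) 0) 1)
        = ((b :: r).getD k 0 ::
          PySem.List.pyRange ((b :: r).getD k 0 + 1) ((b :: r).getD (k + 1) 0) 1) := by
      intro k; simp
    rw [h1, List.range_succ_eq_map]
    simp only [List.flatMap_cons, List.flatMap_map, Nat.succ_eq_add_one]
    simp only [hsh]
    rw [show r.length = (b :: r).length - 1 by simp, flatC_nat (b :: r)]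
    simp [pairsC]

theorem flatS_nat : ∀ (c : List Int) (s : List Char), c.length ≤ s.length + 1 →
    (List.range (c.length - 1)).flatMap
      (fun k : Nat => s.getD k ' ' :: List.replicate (c.getD (k + 1) 0 - c.getD k 0 - 1).toNat '-')
    = pairsS c s
  | [], s, _ => by simp [pairsS]
  | [a], s, _ => by simp [pairsS]
  | a :: b :: r, [], h => by simp at h
  | a :: b :: r, ch :: t, h => by
    have h1 : (a :: b :: r).length - 1 = r.length + 1 := by simp
    have hsh : ∀ k : Nat,
        ((ch :: t).getD (k + 1) ' ' ::
          List.replicate ((a :: b :: r).getD (k + 1 + 1) 0 - (a :: b :: r).getD (k + 1) 0 - 1).toNat '-')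
        = (t.getD k ' ' ::
          List.replicate ((b :: r).getD (k + 1) 0 - (b :: r).getD k 0 - 1).toNat '-') := by
      intro k; simp
    rw [h1, List.range_succ_eq_map]
    simp only [List.flatMap_cons, List.flatMap_map, Nat.succ_eq_add_one]
    simp only [hsh]
    rw [show r.length = (b :: r).length - 1 by simp, flatS_nat (b :: r) t (by simp at h ⊢; omega)]
    simp [pairsS]

theorem A_body (c : List Int) (s : List Char) (hs : c.length ≤ s.length + 1) :
    (PySem.List.pyRange 0 ((c.length : Int) - 1) 1).foldl
      (fun acc i =>
        if PySem.List.pyGetD c (i + 1) 0 - PySem.List.pyGetD c i 0 > 1 then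
          (acc.1 ++ [PySem.List.pyGetD c i 0] ++
             PySem.List.pyRange (PySem.List.pyGetD c i 0 + 1) (PySem.List.pyGetD c (i + 1) 0) 1,
           acc.2 ++ [PySem.List.pyGetD s i ' '] ++
             List.replicate (PySem.List.pyGetD c (i + 1) 0 - PySem.List.pyGetD c i 0 - 1).toNat '-')
        else
          (acc.1 ++ [PySem.List.pyGetD c i 0], acc.2 ++ [PySem.List.pyGetD s i ' ']))
      ([], [])
    = (pairsC c, pairsS c s) := by
  rw [foldA_flat]
  rw [PySem.List.pyRange_one]
  have h0 : ((c.length : Int) - 1 - 0).toNat = c.length - 1 := by omega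
  rw [h0]
  simp only [List.flatMap_map, zero_add]
  have hcast : ∀ k : Nat, ((k : Int) + 1) = ((k + 1 : Nat) : Int) := by intro k; push_cast; ring
  simp only [hcast, PySem.List.pyGetD_natCast]
  rw [flatC_nat c, flatS_nat c s hs]
  simp

theorem pvLastD_cons {α : Type} (x : α) (l : List α) (d : α) :
    ((x :: l).getLast?).getD d = (l.getLast?).getD x := by
  cases l with
  | nil => simp
  | cons b l' =>
    rw [List.getLast?_cons_cons]
    cases hy : (b :: l').getLast? with
    | none => simp at hy
    | some y => simp

theorem altLoop_eq (s : List Char) :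
    ∀ (lc : List (Option Int)) (i : Nat) (prev : Int) (ca : List Int) (pa : List Char),
    1 ≤ i → i - 1 + lc.length ≤ s.length →
    altLoop s lc i prev ca pa =
      (ca ++ pairsC (prev :: fillF lc prev),
       pa ++ pairsS (prev :: fillF lc prev) (s.drop (i - 1)),
       (fillF lc prev).getLastD prev) := by
  intro lc
  induction lc with
  | nil => intro i prev ca pa hi hlen; simp [altLoop, fillF, pairsC, pairsS]
  | cons el rest ih =>
    intro i prev ca pa hi hlen
    have hipos : i > 0 := hi
    have h5 : (el :: rest).length = rest.length + 1 := rfl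
    have hidx : i - 1 < s.length := by omega
    have hdrop : s.drop (i - 1) = s[i - 1] :: s.drop i := by
      have h7 : i - 1 + 1 = i := by omega
      rw [List.drop_eq_getElem_cons hidx, h7]
    have hget : PySem.List.pyGetD s ((i : Int) - 1) ' ' = s[i - 1] := by
      have : ((i : Int) - 1) = ((i - 1 : Nat) : Int) := by omega
      rw [this, PySem.List.pyGetD_natCast]
      simp [List.getD_eq_getElem?_getD, hidx]
    cases el with
    | none =>
      simp only [altLoop, if_pos hipos, fillF]
      rw [ih (i + 1) prev _ _ (by omega) (by omega)]
      simp only [Nat.add_sub_cancel, hdrop, hget]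
      simp [pairsC, pairsS, pvLastD_cons]
    | some e =>
      simp only [altLoop, if_pos hipos, fillF]
      rw [ih (i + 1) (e + 1) _ _ (by omega) (by omega)]
      simp only [Nat.add_sub_cancel, hdrop, hget]
      simp [pairsC, pairsS, pvLastD_cons]

def pvCur (el : Option Int) (p : Int) : Int :=
  match el with | some e => e + 1 | none => p

theorem pvToNat_max (x : Int) : (max 0 x).toNat = x.toNat := by omega

theorem Modifier_spec : Claim_equal_Modifier := by
  intro lc seq reps _hdom hpre
  obtain ⟨hany, hlen, hslen, hreps⟩ := hpre
  unfold Spec_Modifier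
  obtain ⟨f, hf⟩ := findSome?_of_any lc hany
  obtain ⟨el0, rest, rfl⟩ : ∃ el0 rest, lc = el0 :: rest := by
    cases lc with
    | nil => simp at hany
    | cons a l => exact ⟨a, l, rfl⟩
  have hlc : (el0 :: rest).length = rest.length + 1 := rfl
  have hfill : fillF (el0 :: rest) (f + 1) =
      pvCur el0 (f + 1) :: fillF rest (pvCur el0 (f + 1)) := by
    cases el0 <;> simp [fillF, pvCur]
  have hlen' : rest.length ≤ seq.toList.length := by omega
  have hcs : (pvCur el0 (f + 1) :: fillF rest (pvCur el0 (f + 1))).length ≤ seq.toList.length + 1 := by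
    have h9 := fillF_length rest (pvCur el0 (f + 1))
    simp only [List.length_cons, h9]
    omega
  -- reduce A
  simp only [Modifier]
  rw [findSome?_map_add, hf]
  simp only [Option.map_some]
  rw [fillF_eq, hfill]
  rw [A_body _ _ hcs]
  -- reduce B
  simp only [Modifier_alt, hf]
  have hB0 : altLoop seq.toList (el0 :: rest) 0 (f + 1) [] [] =
      altLoop seq.toList rest 1 (pvCur el0 (f + 1)) [] [] := by
    cases el0 <;> simp [altLoop, pvCur]
  rw [hB0, altLoop_eq seq.toList rest 1 _ [] [] (by omega) (by omega)]
  simp only [Nat.sub_self, List.drop_zero, List.nil_append]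
  -- names for the shared pieces
  set cur0 : Int := pvCur el0 (f + 1) with hcur0
  set lastv : Int := (fillF rest cur0).getLastD cur0 with hlastv
  set c : List Int := cur0 :: fillF rest cur0 with hc_def
  set r0 : Int := PySem.List.pyGetD reps 0 0 with hr0
  set r1 : Int := PySem.List.pyGetD reps 1 0 with hr1
  have hlastA : PySem.List.pyGetD c (-1) 0 = lastv := by
    rw [hc_def, hlastv]
    have h9 : PySem.List.pyGetD (cur0 :: fillF rest cur0) (-1) 0
        = ((cur0 :: fillF rest cur0).getLast?).getD 0 := by
      simp [PySem.List.pyGetD, PySem.List.pyGet?_neg_one]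
    rw [h9, pvLastD_cons, List.getLastD_eq_getLast?]
  rw [hlastA]
  set X : List Int := pairsC c ++ [lastv] with hX
  set NS : List Char := pairsS c seq.toList ++ [PySem.List.pyGetD seq.toList (-1) ' '] with hNS
  have hlastX : PySem.List.pyGetD X (-1) 0 = lastv := by
    rw [hX, PySem.List.pyGetD_neg_one_append_singleton]
  -- first padding
  have hpad1 : ∀ ns0 : List Char,
      (if ¬ (r0 ≥ PySem.List.pyGetD X 0 0) then
        (List.replicate (PySem.List.pyGetD X 0 0 - r0).toNat r0 ++ X,
         List.replicate (PySem.List.pyGetD X 0 0 - r0).toNat '-' ++ ns0)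
      else (X, ns0)) =
      (List.replicate (PySem.List.pyGetD X 0 0 - r0).toNat r0 ++ X,
       List.replicate (PySem.List.pyGetD X 0 0 - r0).toNat '-' ++ ns0) := by
    intro ns0
    split_ifs with h
    · have h0 : (PySem.List.pyGetD X 0 0 - r0).toNat = 0 := by omega
      simp [h0]
    · rfl
  rw [hpad1]
  -- last element after first padding
  have hlastP : PySem.List.pyGetD
      (List.replicate (PySem.List.pyGetD X 0 0 - r0).toNat r0 ++ X) (-1) 0 = lastv := by
    rw [hX, ← List.append_assoc, PySem.List.pyGetD_neg_one_append_singleton]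
  rw [hlastP]
  -- second padding
  have hpad2 : ∀ (ys : List Int) (ns0 : List Char),
      (if ¬ (r1 ≤ lastv) then
        (ys ++ List.replicate (r1 - lastv).toNat r1, ns0 ++ List.replicate (r1 - lastv).toNat '-')
      else (ys, ns0)) =
      (ys ++ List.replicate (r1 - lastv).toNat r1, ns0 ++ List.replicate (r1 - lastv).toNat '-') := by
    intro ys ns0
    split_ifs with h
    · have h0 : (r1 - lastv).toNat = 0 := by omega
      simp [h0]
    · rfl
  rw [hpad2]
  simp [pvToNat_max, hX, hNS, List.append_assoc]
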